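-- pv_equiv track=rewrite | github.com/AaronCG01/A01730451_A4.2 | convertNumbers.py | dec_to_hexa
-- ===== SOURCE A (Python) =====
-- def dec_to_hexa(number):
--     """Converts a decimal number to hexadecimal.
--        Negative numbers use 40-bit two's complement,
--        positive numbers are regular hexadecimal.
--     """
--     if number < 0:
--         # Two's complement for negative numbers (40 bits)
--         number = (1 << 40) + number  # Convert to 40-bit two's complement
--         hex_chars = "0123456789ABCDEF"
--         hexadecimal = ""
--         while number > 0:
--             hexadecimal = hex_chars[number % 16] + hexadecimal  # Build hex string
--             number //= 16
--         return hexadecimal if hexadecimal else "0"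
--
--     # Regular hexadecimal conversion for positive numbers
--     if number == 0:
--         return "0"
--     hex_chars = "0123456789ABCDEF"
--     hexadecimal = ""
--     while number > 0:
--         hexadecimal = hex_chars[number % 16] + hexadecimal  # Build hex string
--         number //= 16
--     return hexadecimal
-- ===== SOURCE B (Python) =====
-- def dec_to_hexa(number):
--     """Converts a decimal number to hexadecimal.
--        Negative numbers use 40-bit two's complement,
--        positive numbers are regular hexadecimal.
--     """
--     value = (1 << 40) + number if number < 0 else number
--     if value <= 0:
--         return "0"
--     hex_chars = "0123456789ABCDEF"
--     count = (value.bit_length() + 3) // 4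
--     result = ""
--     for i in range(count - 1, -1, -1):
--         result += hex_chars[(value >> (4 * i)) & 0xF]
--     return result
-- ===== Notes on version B (the rewrite author's own statement) =====
-- stated objective: alternative
-- what changed: Unifies both sign branches by applying the two's-complement offset first, then emits nibbles MSB-first via bit_length and shifts/masks instead of two duplicated LSB-first division loops that prepend to the string.
import Mathlib
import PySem

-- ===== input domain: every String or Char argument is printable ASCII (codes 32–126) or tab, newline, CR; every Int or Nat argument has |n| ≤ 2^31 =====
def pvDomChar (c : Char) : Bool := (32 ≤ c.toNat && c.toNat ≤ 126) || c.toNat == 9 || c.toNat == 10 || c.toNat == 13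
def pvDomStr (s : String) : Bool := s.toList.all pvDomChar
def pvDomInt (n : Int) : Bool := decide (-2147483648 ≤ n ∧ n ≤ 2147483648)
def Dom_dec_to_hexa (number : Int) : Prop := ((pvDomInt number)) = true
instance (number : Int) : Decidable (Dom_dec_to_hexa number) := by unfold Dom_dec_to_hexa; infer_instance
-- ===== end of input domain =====

-- B unifies the sign branches and emits nibbles MSB-first via bit_length and shifts, instead of A's two duplicated LSB-first division loops that prepend; alternative structure, same values.

-- ===== PORT A =====
-- Python A's two identical while-loops, as one helper: prepend hex digit of number % 16, then number //= 16.
def pvHexLoopA (number : Int) (hexadecimal : String) : String :=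
  if h : 0 < number then
    pvHexLoopA (PySem.Int.floordiv number 16)
      (String.singleton ((PySem.Str.pyGet? "0123456789ABCDEF" (PySem.Int.mod number 16)).getD 'X') ++ hexadecimal)
  else hexadecimal
termination_by number.toNat
decreasing_by
  rw [PySem.Int.floordiv_eq_ediv_of_pos (by omega)]
  omega

def dec_to_hexa (number : Int) : String :=
  if number < 0 then
    let number := (1 <<< 40) + number
    let hexadecimal := pvHexLoopA number ""
    if hexadecimal = "" then "0" else hexadecimal
  else if number = 0 then "0"
  else pvHexLoopA number ""

-- ===== PORT B =====
-- literal port of Source B; (4 * i).toNat is exact because every i produced by range(count-1, -1, -1) is ≥ 0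
def dec_to_hexa_alt (number : Int) : String :=
  let value : Int := if number < 0 then (1 <<< 40) + number else number
  if value ≤ 0 then "0"
  else
    let count : Int := PySem.Int.floordiv ((PySem.Int.bitLength value : Int) + 3) 4
    (PySem.List.pyRange (count - 1) (-1) (-1)).foldl
      (fun result i =>
        result ++ String.singleton
          ((PySem.Str.pyGet? "0123456789ABCDEF"
            (PySem.Int.band (value >>> (4 * i).toNat) 15)).getD 'X'))
      ""

-- ===== PRECONDITION & SPEC =====
def Spec_dec_to_hexa (number : Int) (out : String) : Prop := out = dec_to_hexa_alt number
instance (number : Int) (out : String) : Decidable (Spec_dec_to_hexa number out) := by unfold Spec_dec_to_hexa; infer_instance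

-- ===== CLAIM (what is proved, stated in full; the proofs are below) =====
def Claim_equal_dec_to_hexa : Prop := ∀ (number : Int), Dom_dec_to_hexa number → Spec_dec_to_hexa number (dec_to_hexa number)

-- ===== LEMMAS AND PROOFS =====

-- hex digit character for a nibble
def pvDig (k : Nat) : Char := (("0123456789ABCDEF".toList)[k]?).getD 'X'

-- number of base-16 digits of m (0 for m = 0)
def pvNib (m : Nat) : Nat :=
  if h : m = 0 then 0 else pvNib (m / 16) + 1
decreasing_by exact Nat.div_lt_self (Nat.pos_of_ne_zero h) (by omega)

-- the last c hex digits of m, most significant first (leading zeros kept)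
def pvPad : Nat -> Nat -> List Char
  | 0, _ => []
  | c + 1, m => pvPad c (m / 16) ++ [pvDig (m % 16)]

theorem pvNib_pos (m : Nat) (h : 0 < m) : pvNib m = pvNib (m / 16) + 1 := by
  rw [pvNib]; simp [Nat.pos_iff_ne_zero.mp h]

theorem pv_floordiv16 (m : Nat) : PySem.Int.floordiv (m : Int) 16 = ((m / 16 : Nat) : Int) := by
  exact_mod_cast PySem.Int.floordiv_natCast m 16

-- the character A's loop body picks is pvDig (m % 16)
theorem pv_digA (m : Nat) :
    (PySem.Str.pyGet? "0123456789ABCDEF" (PySem.Int.mod (m : Int) 16)).getD 'X'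
      = pvDig (m % 16) := by
  rw [show PySem.Int.mod (m : Int) 16 = ((m % 16 : Nat) : Int) from by
      exact_mod_cast PySem.Int.mod_natCast m 16,
    PySem.Str.pyGet?_natCast]
  rfl

-- A's loop produces exactly the pvNib m digits of m, prepended to acc
theorem pvA_loop (m : Nat) : forall acc : String,
    pvHexLoopA (m : Int) acc = String.ofList (pvPad (pvNib m) m ++ acc.toList) := by
  induction m using Nat.strong_induction_on with
  | _ m ih =>
    intro acc
    rw [pvHexLoopA]
    by_cases h : 0 < m
    · simp only [show (0 : Int) < (m : Int) from by exact_mod_cast h, dif_pos]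
      rw [pv_floordiv16, pv_digA, ih (m / 16) (Nat.div_lt_self h (by omega)), pvNib_pos m h]
      simp [pvPad, List.append_assoc]
    · have h0 : m = 0 := by omega
      subst h0
      simp [pvNib, pvPad]

-- peel the MOST significant of c+1 digits instead of the least significant
theorem pv_pad_top (c : Nat) : forall m : Nat,
    pvPad (c + 1) m = pvDig (m / 16 ^ c % 16) :: pvPad c m := by
  induction c with
  | zero => intro m; simp [pvPad]
  | succ c ih =>
    intro m
    show pvPad (c + 1) (m / 16) ++ [pvDig (m % 16)] = _
    rw [ih (m / 16)]
    show pvDig (m / 16 / 16 ^ c % 16) :: pvPad (c + 1) m = _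
    rw [Nat.div_div_eq_div_mul, <- Nat.pow_succ']

-- the character B's loop body picks at i = c is pvDig of the c-th nibble
theorem pv_digB (n : Int) (hn : 0 <= n) (c : Nat) :
    (PySem.List.pyGet? ['0','1','2','3','4','5','6','7','8','9','A','B','C','D','E','F']
        (PySem.Int.band (n >>> (4 * (c : Int))) 15)).getD 'X'
      = pvDig (n.toNat / 16 ^ c % 16) := by
  rw [show (4 * (c : Int)) = ((4 * c : Nat) : Int) from by push_cast; ring]
  conv_lhs => rw [show n = ((n.toNat : Nat) : Int) from by omega]
  rw [Int.shiftRight_natCast, Nat.shiftRight_eq_div_pow,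
    show (2 : Nat) ^ (4 * c) = 16 ^ c from by rw [pow_mul]; norm_num,
    show (15 : Int) = ((15 : Nat) : Int) from rfl, PySem.Int.band_natCast,
    Nat.and_two_pow_sub_one_eq_mod _ 4, PySem.List.pyGet?_natCast]
  rfl

-- B's loop over range(c-1, -1, -1) appends the last c digits of n, MSB first
theorem pvB_loop (n : Int) (hn : 0 <= n) (c : Nat) : forall acc : String,
    (PySem.List.pyRange ((c : Int) - 1) (-1) (-1)).foldl
      (fun result i =>
        result ++ String.singleton
          ((PySem.Str.pyGet? "0123456789ABCDEF"
            (PySem.Int.band (n >>> (4 * i).toNat) 15)).getD 'X'))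
      acc
    = String.ofList (acc.toList ++ pvPad c n.toNat) := by
  induction c with
  | zero =>
    intro acc
    rw [show ((0 : Nat) : Int) - 1 = -1 from by norm_num,
      PySem.List.pyRange_neg_one_eq_nil (by norm_num)]
    simp [pvPad]
  | succ c ih =>
    intro acc
    rw [show ((c + 1 : Nat) : Int) - 1 = (c : Int) from by push_cast; ring,
      PySem.List.pyRange_neg_one_cons (by omega), List.foldl_cons, ih, pv_pad_top]
    simp [List.append_assoc]
    rw [pv_digB n hn c]

-- Python's (value.bit_length() + 3) // 4 is exactly the hex-digit count pvNib
theorem pvCount (m : Nat) (h : 0 < m) :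
    (PySem.Int.bitLength (m : Int) + 3) / 4 = pvNib m := by
  induction m using Nat.strong_induction_on with
  | _ m ih =>
    by_cases h16 : 16 <= m
    · have h2 : 0 < m / 2 := by omega
      have h4 : 0 < m / 2 / 2 := by omega
      have h8 : 0 < m / 2 / 2 / 2 := by omega
      have hbl : PySem.Int.bitLength (m : Int)
          = PySem.Int.bitLength ((m / 16 : Nat) : Int) + 4 := by
        rw [PySem.Int.bitLength_natCast h, PySem.Int.bitLength_natCast h2,
          PySem.Int.bitLength_natCast h4, PySem.Int.bitLength_natCast h8,
          Nat.div_div_eq_div_mul, Nat.div_div_eq_div_mul, Nat.div_div_eq_div_mul]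
      rw [hbl, pvNib_pos m h, <- ih (m / 16) (Nat.div_lt_self h (by omega)) (by omega)]
      omega
    · -- 1 <= m <= 15: one hex digit, and 1 <= bit_length <= 4
      have hnib : pvNib m = 1 := by
        rw [pvNib_pos m h, show m / 16 = 0 from by omega, pvNib]; simp
      have hub : PySem.Int.bitLength (m : Int) <= 4 := by
        by_contra hc
        have h5 : 4 <= PySem.Int.bitLength (m : Int) - 1 := by omega
        have hle := PySem.Int.two_pow_bitLength_le (m : Int) (by exact_mod_cast Nat.pos_iff_ne_zero.mp h)
        have hpow : (2 : Nat) ^ 4 <= 2 ^ (PySem.Int.bitLength (m : Int) - 1) :=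
          Nat.pow_le_pow_right (by omega) h5
        simp only [Int.natAbs_natCast] at hle
        omega
      have hlb : 1 <= PySem.Int.bitLength (m : Int) := by
        have hlt := PySem.Int.lt_two_pow_bitLength (m : Int)
        simp only [Int.natAbs_natCast] at hlt
        by_contra hc
        rw [show PySem.Int.bitLength (m : Int) = 0 from by omega] at hlt
        omega
      omega

-- for positive v, B's branch produces the pvNib digits of v with no padding
theorem pvB_pos (v : Int) (hv : 0 < v) :
    (PySem.List.pyRange (PySem.Int.floordiv ((PySem.Int.bitLength v : Int) + 3) 4 - 1) (-1) (-1)).foldl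
      (fun result i =>
        result ++ String.singleton
          ((PySem.Str.pyGet? "0123456789ABCDEF"
            (PySem.Int.band (v >>> (4 * i).toNat) 15)).getD 'X'))
      ""
    = String.ofList (pvPad (pvNib v.toNat) v.toNat) := by
  have hcount : PySem.Int.floordiv ((PySem.Int.bitLength v : Int) + 3) 4
      = ((pvNib v.toNat : Nat) : Int) := by
    rw [<- pvCount v.toNat (by omega)]
    conv_lhs => rw [show v = ((v.toNat : Nat) : Int) from by omega]
    rw [show ((PySem.Int.bitLength ((v.toNat : Nat) : Int) : Int) + 3)
        = (((PySem.Int.bitLength ((v.toNat : Nat) : Int) + 3 : Nat)) : Int) from by push_cast; ring]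
    exact_mod_cast PySem.Int.floordiv_natCast _ 4
  rw [hcount, pvB_loop v (by omega) (pvNib v.toNat) ""]
  simp

-- A's loop on positive v, started from "", in the same closed form
theorem pvA_pos (v : Int) (hv : 0 < v) :
    pvHexLoopA v "" = String.ofList (pvPad (pvNib v.toNat) v.toNat) := by
  conv_lhs => rw [show v = ((v.toNat : Nat) : Int) from by omega]
  rw [pvA_loop v.toNat ""]
  simp

theorem pv_pad_ne_nil (m : Nat) (h : 0 < m) : pvPad (pvNib m) m ≠ [] := by
  rw [pvNib_pos m h]
  show pvPad (pvNib (m / 16)) (m / 16) ++ [pvDig (m % 16)] ≠ []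
  simp

theorem pv_main (number : Int) (hdom : Dom_dec_to_hexa number) :
    dec_to_hexa number = dec_to_hexa_alt number := by
  have hdom' : -2147483648 <= number ∧ number <= 2147483648 := by
    unfold Dom_dec_to_hexa pvDomInt at hdom; exact of_decide_eq_true hdom
  by_cases hneg : number < 0
  · -- negative: both sides work on value = 2^40 + number > 0
    have hsh : (1 : Int) <<< 40 = 1099511627776 := by decide
    have hv : (0 : Int) < (1 <<< 40) + number := by omega
    have hA := pvA_pos ((1 <<< 40) + number) hv
    have hne : pvHexLoopA ((1 <<< 40) + number) "" ≠ "" := by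
      rw [hA]
      intro heq
      have hl := congrArg String.toList heq
      simp at hl
      exact pv_pad_ne_nil _ (by omega) hl
    unfold dec_to_hexa dec_to_hexa_alt
    rw [if_pos hneg]
    simp only [if_pos hneg]
    rw [if_neg hne, if_neg (show ¬ ((1 <<< 40) + number <= 0) from by omega), hA,
      pvB_pos ((1 <<< 40) + number) hv]
  · by_cases hz : number = 0
    · subst hz
      unfold dec_to_hexa dec_to_hexa_alt
      norm_num
    · have hpos : 0 < number := by omega
      unfold dec_to_hexa dec_to_hexa_alt
      rw [if_neg hneg, if_neg hz]
      simp only [if_neg hneg]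
      rw [if_neg (show ¬ number <= 0 from by omega), pvA_pos number hpos, pvB_pos number hpos]

-- ===== VERDICT (by name: the statement is the Claim_ definition above) =====
theorem dec_to_hexa_spec : Claim_equal_dec_to_hexa := by
  intro number hdom
  unfold Spec_dec_to_hexa
  exact pv_main number hdom
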